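-- pv_equiv track=rewrite | github.com/Yashwanth-Chandrakumar/100-Days-Coding | hackerearth/Rock Paper Scissors.py | rockPaperScissor
-- ===== SOURCE A (Python) =====
-- def rockPaperScissor(K: int, NEZUKO: str, ZENITSU: str) -> [int]:
--     nezuko_score = 0
--     zenitsu_score = 0
--
--     for i in range(K):
--         nezuko_move = NEZUKO[i % len(NEZUKO)]
--         zenitsu_move = ZENITSU[i % len(ZENITSU)]
--
--         if nezuko_move == zenitsu_move:
--             continue
--
--         if (
--             (nezuko_move == 'R' and zenitsu_move == 'S') or
--             (nezuko_move == 'P' and zenitsu_move == 'R') or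
--             (nezuko_move == 'S' and zenitsu_move == 'P')
--         ):
--             nezuko_score += 1
--         else:
--             zenitsu_score += 1
--
--     return nezuko_score, zenitsu_score
--     pass
-- ===== SOURCE B (Python) =====
-- def _gcd(a, b):
--     while b:
--         a, b = b, a % b
--     return a
--
--
-- def _round(n, z):
--     if n == z:
--         return (0, 0)
--     if (n == 'R' and z == 'S') or (n == 'P' and z == 'R') or (n == 'S' and z == 'P'):
--         return (1, 0)
--     return (0, 1)
--
--
-- def rockPaperScissor(K: int, NEZUKO: str, ZENITSU: str):
--     if K <= 0:
--         return (0, 0)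
--     ln = len(NEZUKO)
--     lz = len(ZENITSU)
--     L = ln * lz // _gcd(ln, lz)
--     m = min(L, K)
--     period = [_round(NEZUKO[i % ln], ZENITSU[i % lz]) for i in range(m)]
--     q, r = divmod(K, L)
--     pn = sum(p[0] for p in period)
--     pz = sum(p[1] for p in period)
--     rn = sum(p[0] for p in period[:r])
--     rz = sum(p[1] for p in period[:r])
--     return (q * pn + rn, q * pz + rz)
-- ===== Notes on version B (the rewrite author's own statement) =====
-- stated objective: alternative
-- what changed: B scores one period of length min(K, lcm(len(NEZUKO),len(ZENITSU))) once and returns q*period_score + remainder_prefix_score with q,r = divmod(K,L), instead of A's round-by-round loop over all K rounds; it trades A's simple loop for periodicity arithmetic that wins only when K far exceeds the move-cycle length.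
import Mathlib
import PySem

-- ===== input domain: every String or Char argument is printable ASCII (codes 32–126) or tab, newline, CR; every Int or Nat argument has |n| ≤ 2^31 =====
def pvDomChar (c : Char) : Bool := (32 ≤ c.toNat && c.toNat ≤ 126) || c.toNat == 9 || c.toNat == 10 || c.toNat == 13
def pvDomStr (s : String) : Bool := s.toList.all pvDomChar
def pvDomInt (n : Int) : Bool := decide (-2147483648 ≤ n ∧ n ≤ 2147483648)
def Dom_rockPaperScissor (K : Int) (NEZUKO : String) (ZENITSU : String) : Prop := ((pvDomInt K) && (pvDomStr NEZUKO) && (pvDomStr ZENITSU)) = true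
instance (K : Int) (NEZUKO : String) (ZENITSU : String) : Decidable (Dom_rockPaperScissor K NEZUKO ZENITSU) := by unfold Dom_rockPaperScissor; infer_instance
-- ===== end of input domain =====

-- B scores one period of length min(K, lcm(len1,len2)) once and combines q*period + remainder
-- (objective: alternative algorithm via periodicity). Return values proved equal on Pre_.

-- ===== PORT A =====
-- NEZUKO[i % len(NEZUKO)]; the default ' ' is only reached when len = 0, where Python raises (outside Pre_)
def pvMove (s : List Char) (i : Int) : Char :=
  PySem.List.pyGetD s (PySem.Int.mod i (s.length : Int)) ' '

def pvAStep (N Z : List Char) (acc : Int × Int) (i : Int) : Int × Int :=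
  let nm := pvMove N i
  let zm := pvMove Z i
  if nm = zm then acc
  else if (nm = 'R' ∧ zm = 'S') ∨ (nm = 'P' ∧ zm = 'R') ∨ (nm = 'S' ∧ zm = 'P') then
    (acc.1 + 1, acc.2)
  else
    (acc.1, acc.2 + 1)

def rockPaperScissor (K : Int) (NEZUKO : String) (ZENITSU : String) : Int × Int :=
  (PySem.List.pyRange 0 K 1).foldl (pvAStep NEZUKO.toList ZENITSU.toList) (0, 0)

-- ===== PORT B =====
def pyGcd (a b : Nat) : Nat :=
  if h : b = 0 then a else pyGcd b (a % b)
termination_by b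
decreasing_by exact Nat.mod_lt _ (Nat.pos_of_ne_zero h)

def pvRound (n z : Char) : Int × Int :=
  if n = z then (0, 0)
  else if (n = 'R' ∧ z = 'S') ∨ (n = 'P' ∧ z = 'R') ∨ (n = 'S' ∧ z = 'P') then (1, 0)
  else (0, 1)

def rockPaperScissor_alt (K : Int) (NEZUKO : String) (ZENITSU : String) : Int × Int :=
  if K ≤ 0 then (0, 0)
  else
    let N := NEZUKO.toList
    let Z := ZENITSU.toList
    let ln := N.length
    let lz := Z.length
    let L := ln * lz / pyGcd ln lz
    let m := min L K.toNat
    let period := (List.range m).map (fun i => pvRound (N.getD (i % ln) ' ') (Z.getD (i % lz) ' '))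
    let q := PySem.Int.floordiv K (L : Int)
    let r := PySem.Int.mod K (L : Int)
    let pn := (period.map Prod.fst).sum
    let pz := (period.map Prod.snd).sum
    let rn := ((period.take r.toNat).map Prod.fst).sum
    let rz := ((period.take r.toNat).map Prod.snd).sum
    (q * pn + rn, q * pz + rz)

-- ===== PRECONDITION & SPEC =====
-- Pre_ excludes only K > 0 with an empty move string, where Python A raises ZeroDivisionError (i % 0)
def Pre_rockPaperScissor (K : Int) (NEZUKO : String) (ZENITSU : String) : Prop :=
  K ≤ 0 ∨ (NEZUKO.toList ≠ [] ∧ ZENITSU.toList ≠ [])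
instance (K : Int) (NEZUKO : String) (ZENITSU : String) : Decidable (Pre_rockPaperScissor K NEZUKO ZENITSU) := by unfold Pre_rockPaperScissor; infer_instance

def pvWitness_rockPaperScissor : Int × String × String := (7, "RPS", "PS")

def Spec_rockPaperScissor (K : Int) (NEZUKO : String) (ZENITSU : String) (out : Int × Int) : Prop := out = rockPaperScissor_alt K NEZUKO ZENITSU
instance (K : Int) (NEZUKO : String) (ZENITSU : String) (out : Int × Int) : Decidable (Spec_rockPaperScissor K NEZUKO ZENITSU out) := by unfold Spec_rockPaperScissor; infer_instance

-- ===== CLAIM (what is proved, stated in full; the proofs are below) =====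
def Claim_equal_rockPaperScissor : Prop := ∀ (K : Int) (NEZUKO : String) (ZENITSU : String), Dom_rockPaperScissor K NEZUKO ZENITSU → Pre_rockPaperScissor K NEZUKO ZENITSU → Spec_rockPaperScissor K NEZUKO ZENITSU (rockPaperScissor K NEZUKO ZENITSU)

-- ===== LEMMAS AND PROOFS =====

theorem pyGcd_eq_gcd (a b : Nat) : pyGcd a b = Nat.gcd a b := by
  induction a, b using pyGcd.induct with
  | case1 a => simp [pyGcd]
  | case2 a b h ih =>
      rw [pyGcd, dif_neg h, ih, Nat.gcd_comm b (a % b), ← Nat.gcd_rec b a]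
      exact Nat.gcd_comm b a

theorem astep_eq (N Z : List Char) (acc : Int × Int) (i : Int) :
    pvAStep N Z acc i = (acc.1 + (pvRound (pvMove N i) (pvMove Z i)).1,
                         acc.2 + (pvRound (pvMove N i) (pvMove Z i)).2) := by
  unfold pvAStep pvRound
  split_ifs <;> simp_all

theorem foldl_pair_add {α : Type} (f : α → Int × Int) (l : List α) (a : Int × Int) :
    l.foldl (fun acc i => (acc.1 + (f i).1, acc.2 + (f i).2)) a
      = (a.1 + (l.map (fun i => (f i).1)).sum, a.2 + (l.map (fun i => (f i).2)).sum) := by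
  induction l generalizing a with
  | nil => simp
  | cons x xs ih => simp [ih]; constructor <;> ring

-- one period shifts away: sum over range (q*L + r) splits into q periods and a remainder
theorem sum_range_periodic (f : Nat → Int) (L : Nat) (hper : ∀ j, f (L + j) = f j) :
    ∀ q r, ((List.range (q * L + r)).map f).sum
      = (q : Int) * ((List.range L).map f).sum + ((List.range r).map f).sum := by
  intro q r
  induction q with
  | zero => simp
  | succ q ih =>
      have hsplit : (q + 1) * L + r = L + (q * L + r) := by ring
      rw [hsplit, List.range_add, List.map_append, List.sum_append, List.map_map]
      have hmap : (List.range (q * L + r)).map (f ∘ (L + ·)) = (List.range (q * L + r)).map f :=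
        List.map_congr_left (fun x _ => hper x)
      rw [hmap, ih]
      push_cast
      ring

theorem rockPaperScissor_spec' (K : Int) (NEZUKO ZENITSU : String)
    (hpre : Pre_rockPaperScissor K NEZUKO ZENITSU) :
    rockPaperScissor K NEZUKO ZENITSU = rockPaperScissor_alt K NEZUKO ZENITSU := by
  by_cases hK : K ≤ 0
  · unfold rockPaperScissor rockPaperScissor_alt
    rw [PySem.List.pyRange_one_eq_nil (by omega)]
    simp [hK]
  · rw [not_le] at hK
    obtain hKle | ⟨hN, hZ⟩ := hpre
    · omega
    set N := NEZUKO.toList with hNdef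
    set Z := ZENITSU.toList with hZdef
    set ln := N.length with hln
    set lz := Z.length with hlz
    have hln0 : 0 < ln := List.length_pos_iff.mpr hN
    have hlz0 : 0 < lz := List.length_pos_iff.mpr hZ
    set L := ln * lz / pyGcd ln lz with hLdef
    have hLlcm : L = Nat.lcm ln lz := by rw [hLdef, pyGcd_eq_gcd]; rfl
    have hL0 : 0 < L := by
      rw [hLlcm]; exact Nat.pos_of_ne_zero (Nat.lcm_ne_zero (by omega) (by omega))
    have hdvdN : ln ∣ L := hLlcm ▸ Nat.dvd_lcm_left ln lz
    have hdvdZ : lz ∣ L := hLlcm ▸ Nat.dvd_lcm_right ln lz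
    set n := K.toNat with hn
    have hKn : K = (n : Int) := by omega
    -- the per-round score as a function of the round number
    set f : Nat → Int × Int := fun j => pvRound (N.getD (j % ln) ' ') (Z.getD (j % lz) ' ') with hf
    have hper1 : ∀ j, (f (L + j)).1 = (f j).1 := by
      intro j
      obtain ⟨t, ht⟩ := hdvdN
      obtain ⟨u, hu⟩ := hdvdZ
      have h1 : (L + j) % ln = j % ln := by rw [ht, Nat.add_comm, Nat.add_mul_mod_self_left]
      have h2 : (L + j) % lz = j % lz := by rw [hu, Nat.add_comm, Nat.add_mul_mod_self_left]
      simp [hf, h1, h2]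
    have hper2 : ∀ j, (f (L + j)).2 = (f j).2 := by
      intro j
      obtain ⟨t, ht⟩ := hdvdN
      obtain ⟨u, hu⟩ := hdvdZ
      have h1 : (L + j) % ln = j % ln := by rw [ht, Nat.add_comm, Nat.add_mul_mod_self_left]
      have h2 : (L + j) % lz = j % lz := by rw [hu, Nat.add_comm, Nat.add_mul_mod_self_left]
      simp [hf, h1, h2]
    -- A is the componentwise sum of f over range n
    have hA : rockPaperScissor K NEZUKO ZENITSU
        = (((List.range n).map (fun j => (f j).1)).sum,
           ((List.range n).map (fun j => (f j).2)).sum) := by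
      unfold rockPaperScissor
      rw [← hNdef, ← hZdef, hKn, PySem.List.pyRange_zero_natCast, List.foldl_map]
      have hfun : (fun (acc : Int × Int) (k : Nat) => pvAStep N Z acc (k : Int))
          = fun acc k => (acc.1 + (f k).1, acc.2 + (f k).2) := by
        funext acc k
        rw [astep_eq]
        simp only [hf, pvMove, ← hln, ← hlz, PySem.Int.mod_natCast, PySem.List.pyGetD_natCast]
      rw [hfun, foldl_pair_add f]
      simp
    -- B with K > 0, unfolded
    set q := n / L with hq
    set r := n % L with hr
    set m := min L n with hm
    have hnqr : q * L + r = n := by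
      rw [hq, hr, Nat.mul_comm, Nat.div_add_mod]
    have hB : rockPaperScissor_alt K NEZUKO ZENITSU
        = ((q : Int) * ((((List.range m).map f).map Prod.fst).sum)
             + ((((List.range m).map f).take r).map Prod.fst).sum,
           (q : Int) * ((((List.range m).map f).map Prod.snd).sum)
             + ((((List.range m).map f).take r).map Prod.snd).sum) := by
      unfold rockPaperScissor_alt
      rw [if_neg (by omega)]
      simp only [← hNdef, ← hZdef, ← hln, ← hlz, ← hLdef, hKn, Int.toNat_natCast,
        PySem.Int.floordiv_natCast, PySem.Int.mod_natCast, ← hq, ← hr, ← hm, ← hf]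
    rw [hA, hB]
    by_cases hge : L ≤ n
    · -- at least one full period: m = L, split the range-n sum into q periods plus remainder
      have hmL : m = L := by rw [hm]; exact min_eq_left hge
      have hrL : r < L := by rw [hr]; exact Nat.mod_lt n hL0
      have htake : ((List.range L).map f).take r = (List.range r).map f := by
        rw [← List.map_take, List.take_range, Nat.min_eq_left (le_of_lt hrL)]
      rw [hmL, htake]
      simp only [List.map_map, Function.comp_def]
      rw [← hnqr, sum_range_periodic _ L hper1 q r, sum_range_periodic _ L hper2 q r]
    · -- K shorter than one period: q = 0, r = n, the remainder sum is the whole sum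
      have hlt : n < L := not_le.mp hge
      have hq0 : q = 0 := by rw [hq]; exact Nat.div_eq_of_lt hlt
      have hrn : r = n := by rw [hr]; exact Nat.mod_eq_of_lt hlt
      have hmn : m = n := by rw [hm]; exact min_eq_right (le_of_lt hlt)
      rw [hq0, hrn, hmn]
      have htake : ((List.range n).map f).take n = (List.range n).map f := by
        apply List.take_of_length_le; simp
      rw [htake]
      simp [List.map_map, Function.comp_def]

-- ===== VERDICT (by name: the statement is the Claim_ definition above) =====
theorem rockPaperScissor_spec : Claim_equal_rockPaperScissor := by
  intro K NEZUKO ZENITSU _ hpre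
  exact rockPaperScissor_spec' K NEZUKO ZENITSU hpre
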